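-- pv_equiv track=rewrite | github.com/PrekshaNema25/Answerability-Metric | answerability_score.py | remove_stopwords_and_NER_line
-- ===== SOURCE A (Python) =====
-- stop_words = {"did", "have", "ourselves", "hers", "between", "yourself",
--               "but", "again", "there", "about", "once", "during", "out", "very",
--               "having", "with", "they", "own", "an", "be", "some", "for", "do", "its",
--               "yours", "such", "into", "of", "most", "itself", "other", "off", "is", "s",
--               "am", "or", "as", "from", "him", "each", "the", "themselves", "until", "below",
--               "are", "we", "these", "your", "his", "through", "don", "nor", "me", "were",
--               "her", "more", "himself", "this", "down", "should", "our", "their", "while",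
--               "above", "both", "up", "to", "ours", "had", "she", "all", "no", "at", "any",
--               "before", "them", "same", "and", "been", "have", "in", "will", "on", "does",
--               "yourselves", "then", "that", "because", "over", "so", "can", "not", "now", "under",
--               "he", "you", "herself", "has", "just", "too", "only", "myself", "those", "i", "after",
--               "few", "t", "being", "if", "theirs", "my", "against", "a", "by", "doing", "it", "further",
--               "was", "here", "than"}
--
-- question_words_global = {'what', 'which', 'why', 'who', 'whom', 'whose', 'where', 'when', 'how',
--                          'What', 'Which', 'Why', 'Who', 'Whom', 'Whose', 'Where', 'When', 'How'}
--
-- def remove_stopwords_and_NER_line(question, relevant_words=None, question_words=None):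
--     if relevant_words is None:
--
--         question = question.split()
--         if question_words is None:
--            question_words = question_words_global
--
--         temp_words = []
--         for word in question_words:
--             for i, w in enumerate(question):
--                 if w == word:
--                     temp_words.append(w)
--                     # If the question type is 'what' or 'which' the following word is generally associated with
--                     # with the answer type. Thus it is important that it is considered a part of the question.
--                     if i+1 < len(question) and (w.lower() == "what" or w.lower() == "which"):
--                         temp_words.append(question[i+1])
--
--         question_split = [item for item in question if item not in temp_words]
--         ner_words = question_split
--         temp_words = []
--
--         for i in ner_words:
--             if i[0].isupper() == False:
--                 if i not in stop_words :
--                     temp_words.append(i)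
--
--         return " ".join(temp_words)
--     else:
--         question_words = question.split()
--         temp_words = []
--         for i in question_words:
--             for j in relevant_words:
--                 if j.lower() in i:
--                     temp_words.append(i)
--         return " ".join(temp_words)
-- ===== SOURCE B (Python) =====
-- stop_words = {"did", "have", "ourselves", "hers", "between", "yourself",
--               "but", "again", "there", "about", "once", "during", "out", "very",
--               "having", "with", "they", "own", "an", "be", "some", "for", "do", "its",
--               "yours", "such", "into", "of", "most", "itself", "other", "off", "is", "s",
--               "am", "or", "as", "from", "him", "each", "the", "themselves", "until", "below",
--               "are", "we", "these", "your", "his", "through", "don", "nor", "me", "were",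
--               "her", "more", "himself", "this", "down", "should", "our", "their", "while",
--               "above", "both", "up", "to", "ours", "had", "she", "all", "no", "at", "any",
--               "before", "them", "same", "and", "been", "have", "in", "will", "on", "does",
--               "yourselves", "then", "that", "because", "over", "so", "can", "not", "now", "under",
--               "he", "you", "herself", "has", "just", "too", "only", "myself", "those", "i", "after",
--               "few", "t", "being", "if", "theirs", "my", "against", "a", "by", "doing", "it", "further",
--               "was", "here", "than"}
--
-- question_words_global = {'what', 'which', 'why', 'who', 'whom', 'whose', 'where', 'when', 'how',
--                          'What', 'Which', 'Why', 'Who', 'Whom', 'Whose', 'Where', 'When', 'How'}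
--
--
-- def remove_stopwords_and_NER_line(question, relevant_words=None, question_words=None):
--     if relevant_words is None:
--         toks = question.split()
--         qw = question_words_global if question_words is None else question_words
--         pairs = list(zip(toks, toks[1:]))
--
--         # A token is kept iff it passes this direct per-token characterisation:
--         # no removal list/set is ever materialised.
--         def keep(t):
--             if t in qw or t[0].isupper() or t in stop_words:
--                 return False
--             return not any(a in qw and a.lower() in ("what", "which") and b == t
--                            for a, b in pairs)
--
--         return " ".join(filter(keep, toks))
--     else:
--         pieces = []
--         for i in question.split():
--             pieces += [i] * sum(j.lower() in i for j in relevant_words)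
--         return " ".join(pieces)
-- ===== Notes on version B (the rewrite author's own statement) =====
-- stated objective: alternative
-- what changed: Instead of A's staged construction (materialise a temp_words removal list via a question_words-by-position nested scan, filter it out, then a second stopword/capital filter pass), B never builds a removal collection: each token is judged by a direct per-token predicate (in question_words / capitalised / stopword / equal to the successor of a what-or-which question word, checked with any() over zip(toks, toks[1:]) adjacent pairs), and the else branch replicates each token by the count of matching relevant words instead of nested append loops.
import Mathlib
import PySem

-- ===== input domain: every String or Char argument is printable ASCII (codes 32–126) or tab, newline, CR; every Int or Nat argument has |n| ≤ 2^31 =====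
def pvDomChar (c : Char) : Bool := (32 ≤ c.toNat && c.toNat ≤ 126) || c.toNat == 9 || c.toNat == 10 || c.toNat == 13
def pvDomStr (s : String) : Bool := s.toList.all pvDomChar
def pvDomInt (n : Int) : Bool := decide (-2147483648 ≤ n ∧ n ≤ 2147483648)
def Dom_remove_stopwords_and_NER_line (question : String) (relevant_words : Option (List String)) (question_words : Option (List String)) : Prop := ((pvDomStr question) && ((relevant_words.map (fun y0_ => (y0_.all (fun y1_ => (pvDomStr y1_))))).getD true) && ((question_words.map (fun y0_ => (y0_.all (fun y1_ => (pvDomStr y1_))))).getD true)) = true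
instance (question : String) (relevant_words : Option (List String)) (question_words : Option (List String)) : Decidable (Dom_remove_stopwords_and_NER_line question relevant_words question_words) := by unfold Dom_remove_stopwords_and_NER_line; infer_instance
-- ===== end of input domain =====

-- B judges each token by a direct per-token predicate (any() over adjacent zip pairs) instead of
-- materialising A's temp_words removal list, and replicates-by-count in the else branch
-- (objective: alternative); return values proved equal on all inputs of the domain.

-- ===== PORT A =====
-- the what/which-successor guard ('i+1 < len(question) and (w.lower() == "what" or w.lower() == "which")')
def pvSucc (toks : List String) (iw : Int × String) : Bool :=
  decide (iw.1 + 1 < (toks.length : Int)) &&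
    (PySem.Str.lower iw.2 == "what" || PySem.Str.lower iw.2 == "which")

-- module-level stop_words (Python set; used only for membership, so a list of its elements is exact)
def pvStopWords : List String := ["did", "have", "ourselves", "hers", "between", "yourself",
  "but", "again", "there", "about", "once", "during", "out", "very",
  "having", "with", "they", "own", "an", "be", "some", "for", "do", "its",
  "yours", "such", "into", "of", "most", "itself", "other", "off", "is", "s",
  "am", "or", "as", "from", "him", "each", "the", "themselves", "until", "below",
  "are", "we", "these", "your", "his", "through", "don", "nor", "me", "were",
  "her", "more", "himself", "this", "down", "should", "our", "their", "while",
  "above", "both", "up", "to", "ours", "had", "she", "all", "no", "at", "any",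
  "before", "them", "same", "and", "been", "have", "in", "will", "on", "does",
  "yourselves", "then", "that", "because", "over", "so", "can", "not", "now", "under",
  "he", "you", "herself", "has", "just", "too", "only", "myself", "those", "i", "after",
  "few", "t", "being", "if", "theirs", "my", "against", "a", "by", "doing", "it", "further",
  "was", "here", "than"]

-- module-level question_words_global (Python set; the per-token results only depend on membership,
-- so iterating a fixed list of its elements yields the same result)
def pvQuestionWordsGlobal : List String := ["what", "which", "why", "who", "whom", "whose",
  "where", "when", "how", "What", "Which", "Why", "Who", "Whom", "Whose", "Where", "When", "How"]

-- A: the nested 'for word in question_words: for i, w in enumerate(question):' loop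
-- (question[i+1] is in range whenever appended — the guard i+1 < len precedes it — so pyGetD is exact)
def pvTempWordsA (toks : List String) (qw : List String) : List String :=
  qw.foldl (fun acc word =>
    (PySem.List.enumerate toks).foldl (fun acc iw =>
      if iw.2 == word then
        let acc2 := acc ++ [iw.2]
        if pvSucc toks iw then
          acc2 ++ [PySem.List.pyGetD toks (iw.1 + 1) ""]
        else acc2
      else acc) acc) []

-- A: the 'for i in ner_words: if i[0].isupper() == False: if i not in stop_words: append' loop
-- (i[0] via pyGet?; the none branch — empty token — is unreachable: split() yields no "")
def pvNerFilterA (xs : List String) : List String :=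
  xs.foldl (fun acc i =>
    match PySem.Str.pyGet? i 0 with
    | some c =>
      if PySem.Chars.isupper c == false then
        if !(pvStopWords.contains i) then acc ++ [i] else acc
      else acc
    | none => acc) []

-- A's else branch: 'for i in question_words: for j in relevant_words: if j.lower() in i: append(i)'
def pvRelevantScanA (toks : List String) (rel : List String) : List String :=
  toks.foldl (fun acc i =>
    rel.foldl (fun acc j =>
      if PySem.Str.isIn (PySem.Str.lower j) i then acc ++ [i] else acc) acc) []

def remove_stopwords_and_NER_line (question : String) (relevant_words : Option (List String)) (question_words : Option (List String)) : String :=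
  match relevant_words with
  | none =>
    let q := PySem.Str.split₀ question
    let qw := question_words.getD pvQuestionWordsGlobal
    let temp_words := pvTempWordsA q qw
    let question_split := q.filter (fun item => !(temp_words.contains item))
    PySem.Str.join " " (pvNerFilterA question_split)
  | some rel =>
    PySem.Str.join " " (pvRelevantScanA (PySem.Str.split₀ question) rel)

-- ===== PORT B =====
-- B: pairs = list(zip(toks, toks[1:]))
def pvPairsB (toks : List String) : List (String × String) :=
  toks.zip (PySem.List.slice toks (some 1) none)

-- B: the per-token keep predicate; no removal collection is built
-- (t[0] via pyGet?; the none branch — empty token — is unreachable: split() yields no "")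
def pvKeepB (qw : List String) (pairs : List (String × String)) (t : String) : Bool :=
  if qw.contains t ||
     (match PySem.Str.pyGet? t 0 with | some c => PySem.Chars.isupper c | none => true) ||
     pvStopWords.contains t then
    false
  else
    !(pairs.any (fun ab =>
        qw.contains ab.1 &&
        (PySem.Str.lower ab.1 == "what" || PySem.Str.lower ab.1 == "which") &&
        ab.2 == t))

-- B's else branch: 'pieces += [i] * sum(j.lower() in i for j in relevant_words)'
def pvRelevantScanB (toks : List String) (rel : List String) : List String :=
  toks.foldl (fun acc i =>
    acc ++ List.replicate (rel.countP (fun j => PySem.Str.isIn (PySem.Str.lower j) i)) i) []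

def remove_stopwords_and_NER_line_alt (question : String) (relevant_words : Option (List String)) (question_words : Option (List String)) : String :=
  match relevant_words with
  | none =>
    let toks := PySem.Str.split₀ question
    let qw := question_words.getD pvQuestionWordsGlobal
    let pairs := pvPairsB toks
    PySem.Str.join " " (toks.filter (pvKeepB qw pairs))
  | some rel =>
    PySem.Str.join " " (pvRelevantScanB (PySem.Str.split₀ question) rel)

-- ===== PRECONDITION & SPEC =====
def Spec_remove_stopwords_and_NER_line (question : String) (relevant_words : Option (List String)) (question_words : Option (List String)) (out : String) : Prop := out = remove_stopwords_and_NER_line_alt question relevant_words question_words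
instance (question : String) (relevant_words : Option (List String)) (question_words : Option (List String)) (out : String) : Decidable (Spec_remove_stopwords_and_NER_line question relevant_words question_words out) := by unfold Spec_remove_stopwords_and_NER_line; infer_instance

-- ===== CLAIM (what is proved, stated in full; the proofs are below) =====
def Claim_equal_remove_stopwords_and_NER_line : Prop := ∀ (question : String) (relevant_words : Option (List String)) (question_words : Option (List String)), Dom_remove_stopwords_and_NER_line question relevant_words question_words → Spec_remove_stopwords_and_NER_line question relevant_words question_words (remove_stopwords_and_NER_line question relevant_words question_words)

-- ===== LEMMAS AND PROOFS =====

-- the characterising predicate of the tokens A's nested pass collects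
def pvDropChar (toks : List String) (qw : List String) (t : String) : Prop :=
  ∃ iw ∈ PySem.List.enumerate toks, iw.2 ∈ qw ∧
    (t = iw.2 ∨ (pvSucc toks iw = true ∧ t = PySem.List.pyGetD toks (iw.1 + 1) ""))

theorem pvTempWordsA_mem (toks qw : List String) (t : String) :
    t ∈ pvTempWordsA toks qw ↔ pvDropChar toks qw t := by
  have hinner : ∀ (word : String) (acc : List String),
      (PySem.List.enumerate toks).foldl (fun acc iw =>
        if iw.2 == word then
          let acc2 := acc ++ [iw.2]
          if pvSucc toks iw then acc2 ++ [PySem.List.pyGetD toks (iw.1 + 1) ""] else acc2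
        else acc) acc
      = acc ++ (PySem.List.enumerate toks).flatMap (fun iw =>
          if iw.2 == word then
            iw.2 :: (if pvSucc toks iw then [PySem.List.pyGetD toks (iw.1 + 1) ""] else [])
          else []) := by
    intro word acc
    rw [PySem.List.foldl_congr_mem (PySem.List.enumerate toks) _
      (fun acc iw => acc ++ (if iw.2 == word then
          iw.2 :: (if pvSucc toks iw then [PySem.List.pyGetD toks (iw.1 + 1) ""] else [])
        else [])) acc
      (by intro acc iw _
          by_cases h1 : (iw.2 == word) = true <;> by_cases h2 : pvSucc toks iw = true <;>
            simp [h1, h2])]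
    exact PySem.List.foldl_append_eq_flatMap _ _ _
  have houter : pvTempWordsA toks qw
      = qw.flatMap (fun word => (PySem.List.enumerate toks).flatMap (fun iw =>
          if iw.2 == word then
            iw.2 :: (if pvSucc toks iw then [PySem.List.pyGetD toks (iw.1 + 1) ""] else [])
          else [])) := by
    unfold pvTempWordsA
    rw [PySem.List.foldl_congr_mem qw _
      (fun acc word => acc ++ (PySem.List.enumerate toks).flatMap (fun iw =>
          if iw.2 == word then
            iw.2 :: (if pvSucc toks iw then [PySem.List.pyGetD toks (iw.1 + 1) ""] else [])
          else [])) []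
      (by intro acc word _; exact hinner word acc)]
    rw [PySem.List.foldl_append_eq_flatMap]
    simp
  rw [houter]
  simp only [List.mem_flatMap, pvDropChar]
  constructor
  · rintro ⟨word, hw, iw, hiw, ht⟩
    by_cases h1 : (iw.2 == word) = true
    · have hew : iw.2 = word := by simpa using h1
      rw [if_pos h1] at ht
      subst hew
      rcases List.mem_cons.mp ht with h | h
      · exact ⟨iw, hiw, hw, Or.inl h⟩
      · by_cases h2 : pvSucc toks iw = true
        · rw [if_pos h2] at h
          exact ⟨iw, hiw, hw, Or.inr ⟨h2, by simpa using h⟩⟩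
        · rw [if_neg h2] at h; cases h
    · rw [if_neg h1] at ht; cases ht
  · rintro ⟨iw, hiw, hq, hC⟩
    refine ⟨iw.2, hq, iw, hiw, ?_⟩
    rw [if_pos (by simp)]
    rcases hC with h | ⟨hc, h⟩
    · exact h ▸ List.mem_cons_self
    · rw [if_pos hc]
      simp [h]

theorem pvNerFilterA_eq_filter (xs : List String) :
    pvNerFilterA xs = xs.filter (fun i =>
      (match PySem.Str.pyGet? i 0 with
        | some c => !PySem.Chars.isupper c
        | none => false) && !(pvStopWords.contains i)) := by
  unfold pvNerFilterA
  rw [PySem.List.foldl_congr_mem xs _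
    (fun acc i => if ((match PySem.Str.pyGet? i 0 with
        | some c => !PySem.Chars.isupper c
        | none => false) && !(pvStopWords.contains i)) then acc ++ [i] else acc) []
    (by intro acc i _
        cases h : PySem.Str.pyGet? i 0 with
        | none =>
          have hL : PySem.List.pyGet? i.toList 0 = none := by simpa using h
          simp [hL]
        | some c =>
          have hL : PySem.List.pyGet? i.toList 0 = some c := by simpa using h
          by_cases hu : PySem.Chars.isupper c = true <;>
            by_cases hs : i ∈ pvStopWords <;> simp [hL, hu, hs])]
  rw [PySem.List.foldl_append_if_eq_filter]
  simp

-- membership in zip(toks, toks[1:]) as an index statement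
theorem pvMem_zip_tail (toks : List String) (ab : String × String) :
    ab ∈ toks.zip toks.tail ↔ ∃ k, ∃ h : k + 1 < toks.length, ab = (toks[k], toks[k + 1]) := by
  rw [List.mem_iff_getElem]
  constructor
  · rintro ⟨k, hk, hget⟩
    have hk' : k + 1 < toks.length := by
      simp [List.length_zip, List.length_tail] at hk; omega
    refine ⟨k, hk', ?_⟩
    rw [← hget, List.getElem_zip]
    simp [List.getElem_tail]
  · rintro ⟨k, hk, rfl⟩
    have hk' : k < (toks.zip toks.tail).length := by
      simp [List.length_zip, List.length_tail]; omega
    exact ⟨k, hk', by rw [List.getElem_zip]; simp [List.getElem_tail]⟩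

-- A's collected-token characterisation equals B's per-token disjunction, for tokens of the list
theorem pvDropChar_iff (toks qw : List String) (t : String) (ht : t ∈ toks) :
    pvDropChar toks qw t ↔
      (t ∈ qw ∨ ∃ ab ∈ toks.zip toks.tail, ab.1 ∈ qw ∧
        (PySem.Str.lower ab.1 = "what" ∨ PySem.Str.lower ab.1 = "which") ∧ ab.2 = t) := by
  unfold pvDropChar
  constructor
  · rintro ⟨iw, hiw, hq, hC⟩
    rcases (PySem.List.mem_enumerate_iff toks 0 iw).mp hiw with ⟨k, hk, rfl⟩
    rcases hC with h | ⟨hs, h⟩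
    · exact Or.inl (h ▸ hq)
    · right
      unfold pvSucc at hs
      simp only [Bool.and_eq_true, decide_eq_true_eq, Bool.or_eq_true, beq_iff_eq] at hs
      obtain ⟨hlt, hlow⟩ := hs
      have hk1 : k + 1 < toks.length := by
        simp only [zero_add] at hlt; exact_mod_cast hlt
      refine ⟨(toks[k], toks[k + 1]), (pvMem_zip_tail toks _).mpr ⟨k, hk1, rfl⟩, hq, hlow, ?_⟩
      rw [h]
      have : (0 + (k : Int)) + 1 = ((k + 1 : Nat) : Int) := by push_cast; ring
      rw [this, PySem.List.pyGetD_natCast]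
      simp [List.getD_eq_getElem?_getD, hk1]
  · rintro (hq | ⟨ab, hab, haq, hlow, hbt⟩)
    · rcases List.mem_iff_getElem.mp ht with ⟨k, hk, rfl⟩
      exact ⟨(0 + (k : Int), toks[k]), (PySem.List.mem_enumerate_iff toks 0 _).mpr ⟨k, hk, rfl⟩,
        hq, Or.inl rfl⟩
    · rcases (pvMem_zip_tail toks ab).mp hab with ⟨k, hk1, rfl⟩
      refine ⟨(0 + (k : Int), toks[k]),
        (PySem.List.mem_enumerate_iff toks 0 _).mpr ⟨k, by omega, rfl⟩, haq, Or.inr ⟨?_, ?_⟩⟩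
      · unfold pvSucc
        simp only [Bool.and_eq_true, decide_eq_true_eq, Bool.or_eq_true, beq_iff_eq]
        exact ⟨by omega, hlow⟩
      · rw [← hbt]
        have : (0 + (k : Int)) + 1 = ((k + 1 : Nat) : Int) := by push_cast; ring
        rw [this, PySem.List.pyGetD_natCast]
        simp [List.getD_eq_getElem?_getD, hk1]

-- main branch: A's two staged filters equal B's single predicate filter
theorem pvListAB (toks qw : List String) :
    pvNerFilterA (toks.filter (fun item => !((pvTempWordsA toks qw).contains item)))
      = toks.filter (pvKeepB qw (pvPairsB toks)) := by
  rw [pvNerFilterA_eq_filter, List.filter_filter]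
  apply List.filter_congr
  intro a ha
  have hpairs : pvPairsB toks = toks.zip toks.tail := by
    unfold pvPairsB; rw [PySem.List.slice_from_one]
  have hdrop : (pvTempWordsA toks qw).contains a
      = (qw.contains a || (pvPairsB toks).any (fun ab =>
          qw.contains ab.1 &&
          (PySem.Str.lower ab.1 == "what" || PySem.Str.lower ab.1 == "which") &&
          ab.2 == a)) := by
    rw [Bool.eq_iff_iff]
    rw [List.contains_iff_mem, pvTempWordsA_mem, pvDropChar_iff toks qw a ha]
    rw [hpairs]
    simp only [Bool.or_eq_true, List.contains_iff_mem, List.any_eq_true, Bool.and_eq_true,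
      beq_iff_eq, Bool.or_eq_true, and_assoc]
  unfold pvKeepB
  rw [hdrop]
  cases h : PySem.Str.pyGet? a 0 with
  | none => simp
  | some c =>
    by_cases hu : PySem.Chars.isupper c = true
    · simp [hu]
    · by_cases hs : a ∈ pvStopWords <;>
      by_cases hq : a ∈ qw <;>
      by_cases hz : ((pvPairsB toks).any fun ab =>
          decide (ab.1 ∈ qw) &&
          (PySem.Str.lower ab.1 == "what" || PySem.Str.lower ab.1 == "which") &&
          ab.2 == a) = true <;>
      simp [hu, hs, hq, hz]

-- else branch: A's nested append loop equals B's replicate-by-count loop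
theorem pvRelevantAB (toks rel : List String) :
    pvRelevantScanA toks rel = pvRelevantScanB toks rel := by
  unfold pvRelevantScanA pvRelevantScanB
  apply PySem.List.foldl_congr_mem
  intro acc i _
  rw [PySem.List.foldl_append_if (fun j => PySem.Str.isIn (PySem.Str.lower j) i)
      (fun _ => i) rel acc]
  congr 1
  rw [List.map_const']
  simp [List.countP_eq_length_filter]

-- ===== VERDICT (by name: the statement is the Claim_ definition above) =====
theorem remove_stopwords_and_NER_line_spec : Claim_equal_remove_stopwords_and_NER_line := by
  intro question relevant_words question_words _
  unfold Spec_remove_stopwords_and_NER_line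
  cases relevant_words with
  | some rel =>
    simp only [remove_stopwords_and_NER_line, remove_stopwords_and_NER_line_alt]
    rw [pvRelevantAB]
  | none =>
    simp only [remove_stopwords_and_NER_line, remove_stopwords_and_NER_line_alt]
    exact congrArg _ (pvListAB (PySem.Str.split₀ question)
      (question_words.getD pvQuestionWordsGlobal))
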